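-- pv_equiv track=rewrite | github.com/petite-etoile/AtCoder | Algorithms/ABC/ABC167/F 2.py | f
-- ===== SOURCE A (Python) =====
-- def f(S):
--     worst = 0
--     res = 0
--     for s in S:
--         if(s=='('):
--             res += 1
--         else:
--             res -= 1
--         worst = min(worst, res)
--     return worst, res
-- ===== SOURCE B (Python) =====
-- def f(S):
--     # Divide and conquer: the (worst-prefix, total) summary of a string is the
--     # monoid product of its halves' summaries:
--     #   combine((wl,tl),(wr,tr)) = (min(wl, tl+wr), tl+tr)
--     def solve(s):
--         n = len(s)
--         if n == 0:
--             return (0, 0)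
--         if n == 1:
--             return (0, 1) if s == '(' else (-1, -1)
--         k = n // 2
--         wl, tl = solve(s[:k])
--         wr, tr = solve(s[k:])
--         return (min(wl, tl + wr), tl + tr)
--     return solve(S)
-- ===== Notes on version B (the rewrite author's own statement) =====
-- stated objective: alternative
-- what changed: Replaces A's single fused left-to-right scan with a divide-and-conquer recursion: each half yields a (worst-prefix, total) summary and the halves are merged with the associative combine (min(wl, tl+wr), tl+tr).
import Mathlib
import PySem

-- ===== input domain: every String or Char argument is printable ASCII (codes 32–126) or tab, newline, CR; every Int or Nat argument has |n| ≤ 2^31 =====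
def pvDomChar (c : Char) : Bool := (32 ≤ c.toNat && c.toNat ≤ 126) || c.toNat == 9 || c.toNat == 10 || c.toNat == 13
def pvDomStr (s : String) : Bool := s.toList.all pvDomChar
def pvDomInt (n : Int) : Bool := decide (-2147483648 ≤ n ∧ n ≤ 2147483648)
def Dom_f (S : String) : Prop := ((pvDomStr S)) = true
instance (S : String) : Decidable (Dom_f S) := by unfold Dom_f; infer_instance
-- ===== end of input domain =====

-- B replaces A's fused left-to-right scan with a divide-and-conquer recursion merging
-- (worst, total) summaries of the two halves; objective: alternative algorithm, same cost.

-- ===== PORT A =====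
def f (S : String) : Int × Int :=
  S.toList.foldl
    (fun (p : Int × Int) s =>
      let res := if s = '(' then p.2 + 1 else p.2 - 1
      (min p.1 res, res))
    (0, 0)

-- ===== PORT B =====
-- merge of two halves' (worst, total) summaries (Source B's return expression)
def pvComb (a b : Int × Int) : Int × Int := (min a.1 (a.2 + b.1), a.2 + b.2)

-- Source B's inner 'solve' on the character list
def pvSolve : List Char → Int × Int
  | [] => (0, 0)
  | [c] => if c = '(' then (0, 1) else (-1, -1)
  | a :: b :: rest =>
      let l := a :: b :: rest
      let k := l.length / 2
      pvComb (pvSolve (l.take k)) (pvSolve (l.drop k))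
termination_by cs => cs.length
decreasing_by
  · simp; omega
  · simp; omega

def f_alt (S : String) : Int × Int := pvSolve S.toList

-- ===== PRECONDITION & SPEC =====
def Spec_f (S : String) (out : Int × Int) : Prop := out = f_alt S
instance (S : String) (out : Int × Int) : Decidable (Spec_f S out) := by unfold Spec_f; infer_instance

-- ===== CLAIM (what is proved, stated in full; the proofs are below) =====
def Claim_equal_f : Prop := ∀ (S : String), Dom_f S → Spec_f S (f S)

-- ===== LEMMAS AND PROOFS =====

-- A's loop body, named for the proofs
def pvAstep (p : Int × Int) (s : Char) : Int × Int :=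
  let res := if s = '(' then p.2 + 1 else p.2 - 1
  (min p.1 res, res)

-- A's summary of a word, run from the initial state
def pvM (cs : List Char) : Int × Int := cs.foldl pvAstep (0, 0)

theorem pvComb_assoc (a b c : Int × Int) :
    pvComb (pvComb a b) c = pvComb a (pvComb b c) := by
  simp only [pvComb, Prod.mk.injEq]
  constructor <;> omega

-- A's fold from any invariant state (w ≤ r) factors through pvComb and pvM
theorem foldA_comb (cs : List Char) : ∀ (w r : Int), w ≤ r →
    cs.foldl pvAstep (w, r) = pvComb (w, r) (pvM cs) := by
  induction cs with
  | nil =>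
      intro w r h
      simp only [List.foldl_nil, pvM, pvComb, Prod.mk.injEq]
      omega
  | cons c rest ih =>
      intro w r h
      have hM : pvM (c :: rest) = pvComb (pvAstep (0, 0) c) (pvM rest) := by
        simp only [pvM, List.foldl_cons]
        exact ih _ _ (by dsimp [pvAstep]; omega)
      rw [List.foldl_cons, ih _ _ (by dsimp [pvAstep]; omega), hM,
        ← pvComb_assoc]
      congr 1
      simp only [pvAstep, pvComb, Prod.mk.injEq]
      split <;> constructor <;> omega

theorem pvM_append (xs ys : List Char) :
    pvM (xs ++ ys) = pvComb (pvM xs) (pvM ys) := by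
  have hinv : ∀ (cs : List Char) (w r : Int), w ≤ r →
      (cs.foldl pvAstep (w, r)).1 ≤ (cs.foldl pvAstep (w, r)).2 := by
    intro cs
    induction cs with
    | nil => intro w r h; simpa using h
    | cons c rest ih =>
        intro w r h
        rw [List.foldl_cons]
        exact ih _ _ (by dsimp [pvAstep]; omega)
  rw [pvM, List.foldl_append]
  exact foldA_comb ys _ _ (hinv xs 0 0 le_rfl)

theorem pvSolve_eq_pvM (cs : List Char) : pvSolve cs = pvM cs := by
  induction cs using pvSolve.induct with
  | case1 => simp [pvSolve, pvM]
  | case2 => simp [pvSolve, pvM, pvAstep]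
  | case3 c hc => simp [pvSolve, pvM, pvAstep, hc]
  | case4 =>
      rename_i a b rest ih1 ih2
      rw [pvSolve, ih1, ih2, ← pvM_append, List.take_append_drop]

-- ===== VERDICT (by name: the statement is the Claim_ definition above) =====
theorem f_spec : Claim_equal_f := by
  intro S _
  unfold Spec_f f f_alt
  rw [pvSolve_eq_pvM]
  rfl
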